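-- pv_equiv track=rewrite | github.com/jliversi/advent_of_code | 2021/d14/solution.py | part_one_step
-- ===== SOURCE A (Python) =====
-- def part_one_step(string, rules):
--     insertions = dict()
--     # build insertions
--     for i in range(len(string) - 1):
--         substr = string[i:i+2]
--         if substr in rules:
--             insertions[i] = rules[substr]
--     new_str = []
--     for i in range(len(string)):
--         new_str.append(string[i])
--         if i in insertions: new_str.append(insertions[i])
--     return ''.join(new_str)
-- ===== SOURCE B (Python) =====
-- def part_one_step(string, rules):
--     if not string:
--         return ''
--     result = []
--     for a, b in zip(string, string[1:]):
--         result.append(a)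
--         pair = a + b
--         if pair in rules:
--             result.append(rules[pair])
--     result.append(string[-1])
--     return ''.join(result)
-- ===== Notes on version B (the rewrite author's own statement) =====
-- stated objective: simpler
-- what changed: B drops A's index-keyed insertions dict and its separate build pass, making a single pass over consecutive character pairs via zip and appending the final character.
import Mathlib
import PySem

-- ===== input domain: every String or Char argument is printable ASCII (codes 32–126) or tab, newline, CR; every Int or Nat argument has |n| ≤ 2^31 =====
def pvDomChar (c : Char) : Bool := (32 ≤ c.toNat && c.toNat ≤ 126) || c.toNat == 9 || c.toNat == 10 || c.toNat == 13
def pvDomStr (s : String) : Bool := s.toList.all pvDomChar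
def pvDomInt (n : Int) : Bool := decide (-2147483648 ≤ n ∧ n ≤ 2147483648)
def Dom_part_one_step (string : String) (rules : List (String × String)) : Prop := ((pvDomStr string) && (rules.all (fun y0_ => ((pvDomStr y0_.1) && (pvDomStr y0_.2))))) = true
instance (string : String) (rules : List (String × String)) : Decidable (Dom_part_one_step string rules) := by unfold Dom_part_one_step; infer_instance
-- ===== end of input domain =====

-- B replaces A's two passes (an index-keyed insertions dict built first, then an index loop
-- reading it back) by one pass over consecutive character pairs (zip) plus the final character.

-- ===== PORT A =====
-- the dict parameter 'rules' as a PySem.Dict (later duplicates overwrite, as in a Python dict)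
def pvRules (rules : List (String × String)) : PySem.Dict String String :=
  PySem.Dict.ofList rules

-- A's first loop: for i in range(len(string) - 1): if string[i:i+2] in rules: insertions[i] = rules[string[i:i+2]]
def pvInsertions (d : PySem.Dict String String) (cs : List Char) : PySem.Dict Int String :=
  (PySem.List.pyRange 0 ((cs.length : Int) - 1) 1).foldl (fun m i =>
    match d.get? (String.ofList (PySem.List.slice cs (some i) (some (i + 2)))) with
    | some v => m.insert i v
    | none => m) PySem.Dict.empty

def part_one_step (string : String) (rules : List (String × String)) : String :=
  let cs := string.toList
  let d := pvRules rules
  let insertions := pvInsertions d cs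
  -- second loop: for i in range(len(string)): append string[i]; if i in insertions: append insertions[i]
  let newStr : List Char :=
    (PySem.List.pyRange 0 (cs.length : Int) 1).foldl (fun acc i =>
      let acc := acc ++ [PySem.List.pyGetD cs i ' ']
      match insertions.get? i with
      | some v => acc ++ v.toList
      | none => acc) []
  String.ofList newStr

-- ===== PORT B =====
-- B's own view of the dict parameter 'rules' (same convention: later duplicates overwrite)
def pvRulesAlt (rules : List (String × String)) : PySem.Dict String String :=
  PySem.Dict.ofList rules

def part_one_step_alt (string : String) (rules : List (String × String)) : String :=
  let cs := string.toList
  if h : cs = [] then "" else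
  let d := pvRulesAlt rules
  let res : List Char :=
    (cs.zip cs.tail).foldl (fun acc p =>
      let acc := acc ++ [p.1]
      match d.get? (String.ofList [p.1, p.2]) with
      | some v => acc ++ v.toList
      | none => acc) []
  String.ofList (res ++ [cs.getLast h])

-- ===== PRECONDITION & SPEC =====
def Spec_part_one_step (string : String) (rules : List (String × String)) (out : String) : Prop := out = part_one_step_alt string rules
instance (string : String) (rules : List (String × String)) (out : String) : Decidable (Spec_part_one_step string rules out) := by unfold Spec_part_one_step; infer_instance

-- ===== CLAIM (what is proved, stated in full; the proofs are below) =====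
def Claim_equal_part_one_step : Prop := ∀ (string : String) (rules : List (String × String)), Dom_part_one_step string rules → Spec_part_one_step string rules (part_one_step string rules)

-- ===== LEMMAS AND PROOFS =====

-- the inserted chars for the pair (a, b), as a list (possibly empty)
def pvOpt (d : PySem.Dict String String) (a b : Char) : List Char :=
  match d.get? (String.ofList [a, b]) with
  | some v => v.toList
  | none => []

-- reference function: both ports compute this
def pvRef (d : PySem.Dict String String) : List Char → List Char
  | [] => []
  | [a] => [a]
  | a :: b :: rest => a :: (pvOpt d a b ++ pvRef d (b :: rest))

-- generic: an appending foldl is a flatMap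
theorem pv_foldl_flatMap {α : Type} (g : α → List Char) (l : List α) (acc : List Char) :
    l.foldl (fun acc x => acc ++ g x) acc = acc ++ l.flatMap g := by
  induction l generalizing acc with
  | nil => simp
  | cons x xs ih => simp [List.foldl_cons, ih, List.flatMap_cons]

-- lookup in the dict built by A's conditional-insert loop over a range
theorem pv_ins_get? (f : Int → Option String) (a b : Int) (m : PySem.Dict Int String) (j : Int) :
    ((PySem.List.pyRange a b 1).foldl (fun m i =>
        match f i with
        | some v => m.insert i v
        | none => m) m).get? j =
      if a ≤ j ∧ j < b then
        (match f j with
         | some v => some v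
         | none => m.get? j)
      else m.get? j := by
  by_cases hab : a < b
  · rw [PySem.List.pyRange_one_cons hab, List.foldl_cons]
    have ih := pv_ins_get? f (a + 1) b
      (match f a with
       | some v => m.insert a v
       | none => m) j
    rw [ih]
    by_cases hja : j = a
    · subst hja
      have h1 : ¬ (j + 1 ≤ j ∧ j < b) := by omega
      have h2 : j ≤ j ∧ j < b := ⟨le_refl j, hab⟩
      rw [if_neg h1, if_pos h2]
      cases hf : f j with
      | some v => simp [PySem.Dict.get?_insert_self]
      | none => simp
    · have hbase : (match f a with
          | some v => m.insert a v
          | none => m).get? j = m.get? j := by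
        cases hf : f a with
        | some v => exact PySem.Dict.get?_insert_of_ne _ _ hja
        | none => rfl
      by_cases hj : a ≤ j ∧ j < b
      · have h3 : a + 1 ≤ j ∧ j < b := by omega
        rw [if_pos h3, if_pos hj]
        cases hf : f j with
        | some v => simp
        | none => simp [hbase]
      · have h4 : ¬ (a + 1 ≤ j ∧ j < b) := by omega
        rw [if_neg h4, if_neg hj, hbase]
  · have hnil : PySem.List.pyRange a b 1 = [] := by
      have hl := PySem.List.length_pyRange_one a b
      cases h : PySem.List.pyRange a b 1 with
      | nil => rfl
      | cons x xs => rw [h] at hl; simp at hl; omega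
    rw [hnil]
    have h5 : ¬ (a ≤ j ∧ j < b) := by omega
    simp [if_neg h5]
termination_by (b - a).toNat
decreasing_by omega

-- B's result (pairs flatMap plus last char) is pvRef
theorem pv_B_eq_ref (d : PySem.Dict String String) (cs : List Char) (h : cs ≠ []) :
    (cs.zip cs.tail).flatMap (fun p => p.1 :: pvOpt d p.1 p.2) ++ [cs.getLast h] = pvRef d cs := by
  match cs with
  | [a] => simp [pvRef]
  | a :: b :: rest =>
    have ih := pv_B_eq_ref d (b :: rest) (by simp)
    simp only [List.tail_cons] at ih ⊢
    rw [List.zip_cons_cons, List.flatMap_cons]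
    have hlast : (a :: b :: rest).getLast (by simp) = (b :: rest).getLast (by simp) :=
      List.getLast_cons (by simp)
    rw [hlast, List.append_assoc, ih]
    simp [pvRef]

-- string[k:k+2] at a valid pair position is the two chars
theorem pv_take2 : ∀ (cs : List Char) (k : Nat), k + 1 < cs.length →
    (cs.drop k).take 2 = [cs.getD k ' ', cs.getD (k + 1) ' ']
  | [], _, hk => by simp at hk
  | a :: t, 0, hk => by
      cases t with
      | nil => simp at hk
      | cons b r => simp
  | a :: t, (k + 1), hk => by
      simpa using pv_take2 t k (by simpa using hk)

theorem pv_slice_pair (cs : List Char) (k : Nat) (hk : k + 1 < cs.length) :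
    PySem.List.slice cs (some (k : Int)) (some ((k : Int) + 2)) =
      [cs.getD k ' ', cs.getD (k + 1) ' '] := by
  have h2 : ((k : Int) + 2) = ((k : Int) + ((2 : Nat) : Int)) := by norm_num
  rw [h2, PySem.List.slice_natCast_add]
  exact pv_take2 cs k hk

-- A's result (range flatMap of char-plus-insertion chunks) is pvRef
theorem pv_A_eq_ref (d : PySem.Dict String String) (cs : List Char) :
    (List.range cs.length).flatMap (fun k =>
        cs.getD k ' ' ::
          (if (k : Int) < (cs.length : Int) - 1 then
            pvOpt d (cs.getD k ' ') (cs.getD (k + 1) ' ')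
          else [])) = pvRef d cs := by
  induction cs with
  | nil => simp [pvRef]
  | cons a cs' ih =>
    rw [List.length_cons, List.range_succ_eq_map, List.flatMap_cons, List.flatMap_map]
    have hpt : ∀ k ∈ List.range cs'.length,
        ((a :: cs').getD (k + 1) ' ' ::
          (if ((k + 1 : Nat) : Int) < ((cs'.length + 1 : Nat) : Int) - 1 then
            pvOpt d ((a :: cs').getD (k + 1) ' ') ((a :: cs').getD (k + 1 + 1) ' ')
          else [])) =
        (fun k => cs'.getD k ' ' ::
          (if (k : Int) < (cs'.length : Int) - 1 then
            pvOpt d (cs'.getD k ' ') (cs'.getD (k + 1) ' ')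
          else [])) k := by
      intro k _
      simp only [List.getD_cons_succ]
      exact congrArg _ (if_congr (by push_cast; omega) rfl rfl)
    rw [List.flatMap_congr hpt, ih]
    cases cs' with
    | nil => norm_num [pvRef]
    | cons b r => simp [pvRef]

-- A's second loop computes pvRef
theorem pv_A_newStr (d : PySem.Dict String String) (cs : List Char) :
    (PySem.List.pyRange 0 (cs.length : Int) 1).foldl (fun acc i =>
        match (pvInsertions d cs).get? i with
        | some v => (acc ++ [PySem.List.pyGetD cs i ' ']) ++ v.toList
        | none => acc ++ [PySem.List.pyGetD cs i ' ']) [] = pvRef d cs := by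
  have hfun : (fun (acc : List Char) (i : Int) =>
      match (pvInsertions d cs).get? i with
      | some v => (acc ++ [PySem.List.pyGetD cs i ' ']) ++ v.toList
      | none => acc ++ [PySem.List.pyGetD cs i ' ']) =
      fun acc i => acc ++ (PySem.List.pyGetD cs i ' ' ::
        (match (pvInsertions d cs).get? i with
         | some v => v.toList
         | none => [])) := by
    funext acc i
    cases hf : (pvInsertions d cs).get? i <;> simp
  rw [hfun, pv_foldl_flatMap, List.nil_append, PySem.List.pyRange_one]
  simp only [sub_zero, Int.toNat_natCast, List.flatMap_map, zero_add]
  have hpt : ∀ k ∈ List.range cs.length,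
      (PySem.List.pyGetD cs (k : Int) ' ' ::
        (match (pvInsertions d cs).get? (k : Int) with
         | some v => v.toList
         | none => [])) =
      (fun k => cs.getD k ' ' ::
        (if (k : Int) < (cs.length : Int) - 1 then
          pvOpt d (cs.getD k ' ') (cs.getD (k + 1) ' ')
        else [])) k := by
    intro k hk
    have hkn : k < cs.length := List.mem_range.mp hk
    have hget : (pvInsertions d cs).get? (k : Int) =
        if (k : Int) < (cs.length : Int) - 1 then
          d.get? (String.ofList (PySem.List.slice cs (some (k : Int)) (some ((k : Int) + 2))))
        else none := by
      unfold pvInsertions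
      rw [pv_ins_get?]
      by_cases h2 : (k : Int) < (cs.length : Int) - 1
      · have h1 : (0 : Int) ≤ (k : Int) ∧ (k : Int) < (cs.length : Int) - 1 :=
          ⟨Int.natCast_nonneg k, h2⟩
        rw [if_pos h1, if_pos h2]
        cases hf : d.get? (String.ofList (PySem.List.slice cs (some (k : Int)) (some ((k : Int) + 2)))) <;>
          simp
      · have h1 : ¬ ((0 : Int) ≤ (k : Int) ∧ (k : Int) < (cs.length : Int) - 1) := by omega
        rw [if_neg h1, if_neg h2]
        simp
    simp only [hget, PySem.List.pyGetD_natCast]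
    by_cases hlt : (k : Int) < (cs.length : Int) - 1
    · have hk1 : k + 1 < cs.length := by omega
      rw [if_pos hlt, if_pos hlt, pv_slice_pair cs k hk1]
      rfl
    · rw [if_neg hlt, if_neg hlt]
  exact (List.flatMap_congr hpt).trans (pv_A_eq_ref d cs)

-- ===== VERDICT (by name: the statement is the Claim_ definition above) =====
theorem part_one_step_spec : Claim_equal_part_one_step := by
  intro string rules _
  unfold Spec_part_one_step
  simp only [part_one_step, part_one_step_alt]
  by_cases h : string.toList = []
  · rw [dif_pos h]
    simp only [h]
    rfl
  · rw [dif_neg h]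
    rw [pv_A_newStr (pvRules rules) string.toList]
    have hBfun : (fun (acc : List Char) (p : Char × Char) =>
        match (pvRulesAlt rules).get? (String.ofList [p.1, p.2]) with
        | some v => (acc ++ [p.1]) ++ v.toList
        | none => acc ++ [p.1]) =
        fun acc p => acc ++ (p.1 :: pvOpt (pvRulesAlt rules) p.1 p.2) := by
      funext acc p
      cases hf : (pvRulesAlt rules).get? (String.ofList [p.1, p.2]) <;> simp [pvOpt, hf]
    rw [hBfun, pv_foldl_flatMap, List.nil_append,
      pv_B_eq_ref (pvRulesAlt rules) string.toList h]
    have hdd : pvRulesAlt rules = pvRules rules := rfl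
    rw [hdd]
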